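-- pv_equiv track=rewrite | github.com/bentrenguyen/poe_gems | poe_gems.py | findUniqueSubstring
-- ===== SOURCE A (Python) =====
-- def findUniqueSubstring(gem_tab, substring_list):
--     unique_substring_dict = {}
--     for i in range(len(substring_list)):
--         gem_name = gem_tab[i]
--         for substring in substring_list[i]:
--             has_match = False
--             for j in range(len(substring_list)):
--                 if i == j:
--                     continue
--                 if substring in substring_list[j]:
--                     has_match = True
--                     break
--             if has_match == False:
--                 unique_substring_dict[gem_name] = substring
--                 break
--     return unique_substring_dict
-- ===== SOURCE B (Python) =====
-- def findUniqueSubstring(gem_tab, substring_list):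
--     # one pass: count in how many groups each substring occurs (dedup within a group),
--     # then pick per group the first substring whose group-count is 1
--     count = {}
--     for group in substring_list:
--         for s in dict.fromkeys(group):
--             count[s] = count.get(s, 0) + 1
--     result = {}
--     for i, group in enumerate(substring_list):
--         name = gem_tab[i]
--         for s in group:
--             if count.get(s, 0) == 1:
--                 result[name] = s
--                 break
--     return result
-- ===== Notes on version B (the rewrite author's own statement) =====
-- stated objective: faster
-- what changed: Replaces the per-substring scan over all other groups with a single precomputed map from substring to the number of groups containing it, so uniqueness is a single lookup.
import Mathlib
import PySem

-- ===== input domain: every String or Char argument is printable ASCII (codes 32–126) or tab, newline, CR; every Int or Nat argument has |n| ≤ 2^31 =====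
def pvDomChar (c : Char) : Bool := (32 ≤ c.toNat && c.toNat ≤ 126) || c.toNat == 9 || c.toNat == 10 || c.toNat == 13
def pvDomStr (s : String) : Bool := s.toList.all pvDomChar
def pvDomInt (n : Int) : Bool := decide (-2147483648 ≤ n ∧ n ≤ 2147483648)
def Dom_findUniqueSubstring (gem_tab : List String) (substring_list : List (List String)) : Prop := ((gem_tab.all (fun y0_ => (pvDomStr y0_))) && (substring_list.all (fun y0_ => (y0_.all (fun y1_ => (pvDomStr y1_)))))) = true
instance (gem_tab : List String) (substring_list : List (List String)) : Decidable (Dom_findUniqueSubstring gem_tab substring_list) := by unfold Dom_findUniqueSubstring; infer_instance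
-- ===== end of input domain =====

-- B replaces A's quadratic scan over all other groups by a precomputed substring->group-count map; faster.
-- Pre_ excludes only inputs where Python A raises IndexError (fewer gem names than groups).


-- ===== PORT A =====
def findUniqueSubstring (gem_tab : List String) (substring_list : List (List String)) : List (String × String) :=
  ((PySem.List.pyRange 0 (substring_list.length : Int) 1).foldl (fun d i =>
    let gem_name := PySem.List.pyGetD gem_tab i ""
    -- for substring in substring_list[i] with break: find? the first with no match
    match (PySem.List.pyGetD substring_list i []).find? (fun s =>
        -- inner 'for j' loop with break: any j ≠ i whose group contains s
        ! (PySem.List.pyRange 0 (substring_list.length : Int) 1).any (fun j =>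
            (j != i) && (PySem.List.pyGetD substring_list j []).contains s)) with
    | some s => d.insert gem_name s
    | none => d) (PySem.Dict.empty : PySem.Dict String String)).items

-- ===== PORT B =====
def findUniqueSubstring_alt (gem_tab : List String) (substring_list : List (List String)) : List (String × String) :=
  let count : PySem.Dict String Int :=
    substring_list.foldl (fun d group =>
      (PySem.List.dedup group).foldl (fun d s => d.insert s (d.getD s 0 + 1)) d)
      PySem.Dict.empty
  ((PySem.List.enumerate substring_list).foldl (fun d p =>
    let name := PySem.List.pyGetD gem_tab p.1 ""
    match p.2.find? (fun s => count.getD s 0 == 1) with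
    | some s => d.insert name s
    | none => d) (PySem.Dict.empty : PySem.Dict String String)).items

-- ===== PRECONDITION & SPEC =====
-- Pre_: A (and B) index gem_tab[i] for every i < len(substring_list); both raise IndexError otherwise.
def Pre_findUniqueSubstring (gem_tab : List String) (substring_list : List (List String)) : Prop :=
  substring_list.length ≤ gem_tab.length
instance (gem_tab : List String) (substring_list : List (List String)) : Decidable (Pre_findUniqueSubstring gem_tab substring_list) := by unfold Pre_findUniqueSubstring; infer_instance

def pvWitness_findUniqueSubstring : List String × List (List String) :=
  (["a", "b"], [["x", "z"], ["z", "y"]])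

def Spec_findUniqueSubstring (gem_tab : List String) (substring_list : List (List String)) (out : List (String × String)) : Prop := out = findUniqueSubstring_alt gem_tab substring_list
instance (gem_tab : List String) (substring_list : List (List String)) (out : List (String × String)) : Decidable (Spec_findUniqueSubstring gem_tab substring_list out) := by unfold Spec_findUniqueSubstring; infer_instance

-- ===== CLAIM (what is proved, stated in full; the proofs are below) =====
def Claim_equal_findUniqueSubstring : Prop := ∀ (gem_tab : List String) (substring_list : List (List String)), Dom_findUniqueSubstring gem_tab substring_list → Pre_findUniqueSubstring gem_tab substring_list → Spec_findUniqueSubstring gem_tab substring_list (findUniqueSubstring gem_tab substring_list)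

-- ===== LEMMAS AND PROOFS =====

-- the counter built by B holds, for each substring, the number of groups containing it
theorem getD_countFold (l : List (List String)) (d : PySem.Dict String Int) (s : String) :
    (l.foldl (fun d group =>
        (PySem.List.dedup group).foldl (fun d s => d.insert s (d.getD s 0 + 1)) d) d).getD s 0
      = d.getD s 0 + (l.countP (fun g => g.contains s) : Int) := by
  induction l generalizing d with
  | nil => simp
  | cons g l ih =>
    simp only [List.foldl_cons, List.countP_cons]
    rw [ih, PySem.Dict.getD_foldl_insert_add_one]
    by_cases h : s ∈ g
    · rw [List.count_eq_one_of_mem (PySem.List.nodup_dedup g) (by simp [h])]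
      simp [h]; ring
    · rw [(by simp [List.count_eq_zero, h] : (PySem.List.dedup g).count s = 0)]
      simp [h]

-- countP = 1 given a satisfying index i iff no other index satisfies P
theorem countP_eq_one_iff {α : Type} (l : List α) (P : α → Bool) (i : Nat) (hi : i < l.length)
    (hPi : P l[i] = true) :
    (l.countP P = 1 ↔ ∀ j (hj : j < l.length), j ≠ i → P l[j] = false) := by
  induction l generalizing i with
  | nil => simp at hi
  | cons a l ih =>
    simp only [List.length_cons] at hi ⊢
    cases i with
    | zero =>
      simp only [List.getElem_cons_zero] at hPi
      rw [List.countP_cons, hPi, if_pos rfl]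
      have hz : l.countP P = 0 ↔ ∀ j (hj : j < l.length), P l[j] = false := by
        rw [List.countP_eq_zero]
        constructor
        · intro h j hj
          exact Bool.eq_false_iff.mpr (fun hb => by simpa [hb] using h _ (l.getElem_mem hj))
        · intro h x hx
          obtain ⟨j, hj, rfl⟩ := List.getElem_of_mem hx
          simp [h j hj]
      constructor
      · intro h j hj hne
        cases j with
        | zero => exact absurd rfl hne
        | succ j =>
          simp only [List.getElem_cons_succ]
          exact (hz.mp (by omega)) j (by omega)
      · intro h
        have : l.countP P = 0 := hz.mpr (fun j hj => by
          simpa using h (j+1) (by omega) (by omega))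
        omega
    | succ i =>
      simp only [List.getElem_cons_succ] at hPi
      have hpos : 0 < l.countP P := by
        rw [List.countP_pos_iff]
        exact ⟨l[i], l.getElem_mem (by omega), hPi⟩
      have ihh := ih i (by omega) hPi
      rw [List.countP_cons]
      by_cases hpa : P a = true
      · rw [if_pos hpa]
        constructor
        · intro h; exfalso; omega
        · intro h; exfalso
          have h0 := h 0 (by omega) (by omega)
          simp only [List.getElem_cons_zero] at h0
          rw [hpa] at h0; cases h0
      · rw [if_neg hpa, Nat.add_zero, ihh]
        have hPa : P a = false := by simpa using hpa
        constructor
        · intro h j hj hne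
          cases j with
          | zero => simpa using hPa
          | succ j => simpa using h j (by omega) (by omega)
        · intro h j hj hne
          simpa using h (j+1) (by omega) (by omega)

theorem find?_congr_mem {α : Type} (l : List α) (p q : α → Bool)
    (h : ∀ x ∈ l, p x = q x) : l.find? p = l.find? q := by
  induction l with
  | nil => rfl
  | cons a l ih =>
    simp only [List.find?]
    rw [h a (by simp)]
    cases q a
    · exact ih (fun x hx => h x (by simp [hx]))
    · rfl

theorem main_eq (gem_tab : List String) (substring_list : List (List String)) :
    findUniqueSubstring gem_tab substring_list = findUniqueSubstring_alt gem_tab substring_list := by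
  unfold findUniqueSubstring findUniqueSubstring_alt
  rw [PySem.List.enumerate_eq_map_pyRange substring_list ([] : List String)]
  simp only [List.foldl_map]
  apply congrArg PySem.Dict.items
  apply PySem.List.foldl_congr_mem
  intro acc i hi
  rw [PySem.List.mem_pyRange_one] at hi
  have hget : PySem.List.pyGetD substring_list i [] = substring_list[i.toNat]'(by omega) :=
    PySem.List.pyGetD_eq_getElem _ _ hi.1 (by exact_mod_cast hi.2)
  have hfind : (PySem.List.pyGetD substring_list i []).find? (fun s =>
        ! (PySem.List.pyRange 0 (substring_list.length : Int) 1).any (fun j =>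
            (j != i) && (PySem.List.pyGetD substring_list j []).contains s))
      = (PySem.List.pyGetD substring_list i []).find? (fun s =>
          (substring_list.foldl (fun d group =>
            (PySem.List.dedup group).foldl (fun d s => d.insert s (d.getD s 0 + 1)) d)
            (PySem.Dict.empty : PySem.Dict String Int)).getD s 0 == 1) := by
    apply find?_congr_mem
    intro s hs
    rw [hget] at hs
    have hPi : (substring_list[i.toNat]'(by omega)).contains s = true := by
      simpa using hs
    simp only [getD_countFold, PySem.Dict.getD_empty, zero_add]
    rw [Bool.eq_iff_iff]
    simp only [Bool.not_eq_eq_eq_not, Bool.not_true, List.any_eq_false, Bool.and_eq_true,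
      bne_iff_ne, ne_eq]
    have hcount := countP_eq_one_iff substring_list (fun g => g.contains s) i.toNat (by omega) hPi
    constructor
    · intro h
      have h1 : substring_list.countP (fun g => g.contains s) = 1 := by
        apply hcount.mpr
        intro j hj hne
        have hm := h (j : Int) (by rw [PySem.List.mem_pyRange_one]; exact ⟨by omega, by exact_mod_cast hj⟩)
        by_contra hb
        apply hm
        refine ⟨fun he => hne (by omega), ?_⟩
        rw [PySem.List.pyGetD_eq_getElem _ _ (by omega) (by exact_mod_cast hj)]
        simpa using hb
      simp only [beq_iff_eq]
      exact_mod_cast h1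
    · intro h x hx
      rw [PySem.List.mem_pyRange_one] at hx
      have h1 : substring_list.countP (fun g => g.contains s) = 1 := by simpa using h
      rintro ⟨hne, hc⟩
      have hx2 : x.toNat < substring_list.length := by omega
      have hfalse := hcount.mp h1 x.toNat hx2 (fun he => hne (by omega))
      rw [PySem.List.pyGetD_eq_getElem _ _ (by omega) (by omega)] at hc
      simp only at hfalse
      rw [hfalse] at hc
      cases hc
  rw [hfind]

-- ===== VERDICT (by name: the statement is the Claim_ definition above) =====
theorem findUniqueSubstring_spec : Claim_equal_findUniqueSubstring := by
  intro gem_tab substring_list _ _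
  exact main_eq gem_tab substring_list
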